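-- pv_equiv track=rewrite | github.com/tayoogunbiyi/quora-haqathon | upvotes/main.py | count_non_incr_and_non_decr_subranges
-- ===== SOURCE A (Python) =====
-- from typing import List, Tuple
--
-- def count_non_incr_and_non_decr_subranges(arr: List[int], start: int, end: int) -> int:
--     non_incr_count = 0
--     non_decr_count = 0
--     for i in range(start, end + 1):
--         for j in range(i + 2, end + 1):
--             is_non_incr = all([arr[k] >= arr[k + 1] for k in range(i, j - 1)])
--             non_incr_count += 1 if is_non_incr else 0
--             is_non_decr = all([arr[k] >= arr[k - 1] for k in range(i + 1, j)])
--             non_decr_count += 1 if is_non_decr else 0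
--
--     return non_incr_count, non_decr_count
-- ===== SOURCE B (Python) =====
-- from typing import List, Tuple
--
-- def count_non_incr_and_non_decr_subranges(arr: List[int], start: int, end: int) -> Tuple[int, int]:
--     # One pass over adjacent pairs: a subrange of length >= 2 is monotone iff all its
--     # adjacent comparisons hold, so adding the current run length at each position
--     # counts every monotone subrange ending there.
--     non_incr_count = 0
--     non_decr_count = 0
--     run_incr = 0
--     run_decr = 0
--     for k in range(start, end - 1):
--         if arr[k] >= arr[k + 1]:
--             run_incr += 1
--         else:
--             run_incr = 0
--         non_incr_count += run_incr
--         if arr[k] <= arr[k + 1]: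
--             run_decr += 1
--         else:
--             run_decr = 0
--         non_decr_count += run_decr
--     return non_incr_count, non_decr_count
-- ===== Notes on version B (the rewrite author's own statement) =====
-- stated objective: alternative
-- what changed: Replaced the triple-nested scan that re-checks monotonicity of every (i,j) subrange with a single pass over adjacent comparisons that maintains the current non-increasing/non-decreasing run lengths and adds the run length at each step.
import Mathlib
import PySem

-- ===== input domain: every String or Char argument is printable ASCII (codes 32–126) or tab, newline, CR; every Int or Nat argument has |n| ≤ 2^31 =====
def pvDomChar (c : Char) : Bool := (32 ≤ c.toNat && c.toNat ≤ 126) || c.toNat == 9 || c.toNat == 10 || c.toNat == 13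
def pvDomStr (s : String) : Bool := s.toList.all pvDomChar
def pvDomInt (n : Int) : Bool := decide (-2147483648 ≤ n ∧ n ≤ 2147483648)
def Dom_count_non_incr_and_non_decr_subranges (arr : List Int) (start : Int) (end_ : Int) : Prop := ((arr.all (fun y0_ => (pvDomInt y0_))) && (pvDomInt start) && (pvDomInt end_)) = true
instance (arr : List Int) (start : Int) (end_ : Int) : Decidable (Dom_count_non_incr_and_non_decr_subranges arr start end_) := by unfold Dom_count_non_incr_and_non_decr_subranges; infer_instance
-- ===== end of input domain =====

-- B replaces A's triple-nested subrange scan by a single pass that accumulates monotone run lengths (objective: alternative).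

-- ===== PORT A =====
def count_non_incr_and_non_decr_subranges (arr : List Int) (start : Int) (end_ : Int) : Int × Int :=
  (PySem.List.pyRange start (end_ + 1) 1).foldl (fun (acc : Int × Int) i =>
    (PySem.List.pyRange (i + 2) (end_ + 1) 1).foldl (fun (acc2 : Int × Int) j =>
      let is_non_incr := ((PySem.List.pyRange i (j - 1) 1).map
        (fun k => decide (PySem.List.pyGetD arr k 0 ≥ PySem.List.pyGetD arr (k + 1) 0))).all (fun x => x)
      let non_incr_count := acc2.1 + if is_non_incr then 1 else 0
      let is_non_decr := ((PySem.List.pyRange (i + 1) j 1).map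
        (fun k => decide (PySem.List.pyGetD arr k 0 ≥ PySem.List.pyGetD arr (k - 1) 0))).all (fun x => x)
      let non_decr_count := acc2.2 + if is_non_decr then 1 else 0
      (non_incr_count, non_decr_count)) acc) (0, 0)

-- ===== PORT B =====
def count_non_incr_and_non_decr_subranges_alt (arr : List Int) (start : Int) (end_ : Int) : Int × Int :=
  let r := (PySem.List.pyRange start (end_ - 1) 1).foldl
    (fun (st : (Int × Int) × (Int × Int)) k =>
      let run_incr := if PySem.List.pyGetD arr k 0 ≥ PySem.List.pyGetD arr (k + 1) 0 then st.1.2 + 1 else 0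
      let run_decr := if PySem.List.pyGetD arr k 0 ≤ PySem.List.pyGetD arr (k + 1) 0 then st.2.2 + 1 else 0
      ((st.1.1 + run_incr, run_incr), (st.2.1 + run_decr, run_decr))) ((0, 0), (0, 0))
  (r.1.1, r.2.1)

-- ===== PRECONDITION & SPEC =====
-- Pre_ excludes exactly the inputs where Python A raises IndexError: when end ≥ start+2 it reads
-- arr[start] … arr[end-1] (negative indices wrap), so all of them must lie in [-len(arr), len(arr)).
def Pre_count_non_incr_and_non_decr_subranges (arr : List Int) (start : Int) (end_ : Int) : Prop :=
  end_ ≤ start + 1 ∨ (-(arr.length : Int) ≤ start ∧ end_ ≤ (arr.length : Int))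
instance (arr : List Int) (start : Int) (end_ : Int) : Decidable (Pre_count_non_incr_and_non_decr_subranges arr start end_) := by unfold Pre_count_non_incr_and_non_decr_subranges; infer_instance

def pvWitness_count_non_incr_and_non_decr_subranges : List Int × Int × Int := ([2, 1, 1, 3], 0, 3)

def Spec_count_non_incr_and_non_decr_subranges (arr : List Int) (start : Int) (end_ : Int) (out : Int × Int) : Prop := out = count_non_incr_and_non_decr_subranges_alt arr start end_
instance (arr : List Int) (start : Int) (end_ : Int) (out : Int × Int) : Decidable (Spec_count_non_incr_and_non_decr_subranges arr start end_ out) := by unfold Spec_count_non_incr_and_non_decr_subranges; infer_instance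

-- ===== CLAIM (what is proved, stated in full; the proofs are below) =====
def Claim_equal_count_non_incr_and_non_decr_subranges : Prop := ∀ (arr : List Int) (start : Int) (end_ : Int), Dom_count_non_incr_and_non_decr_subranges arr start end_ → Pre_count_non_incr_and_non_decr_subranges arr start end_ → Spec_count_non_incr_and_non_decr_subranges arr start end_ (count_non_incr_and_non_decr_subranges arr start end_)

-- ===== LEMMAS AND PROOFS =====

-- comparison sequences: pvCI/pvCD arr k compares arr[k] with arr[k+1]
def pvCI (arr : List Int) (k : Int) : Bool := decide (PySem.List.pyGetD arr k 0 ≥ PySem.List.pyGetD arr (k + 1) 0)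
def pvCD (arr : List Int) (k : Int) : Bool := decide (PySem.List.pyGetD arr k 0 ≤ PySem.List.pyGetD arr (k + 1) 0)

-- all comparisons with index in [a, b) hold
def pvAll (c : Int → Bool) (a b : Int) : Bool := (PySem.List.pyRange a b 1).all c

-- length of the maximal true run of c ending at k (not reaching left of s)
def pvRun (c : Int → Bool) (s k : Int) : Int :=
  if k < s then 0 else (if c k then pvRun c s (k - 1) + 1 else 0)
termination_by (k + 1 - s).toNat
decreasing_by omega

-- sum of run lengths over comparison indices in [s, e)
def pvS (c : Int → Bool) (s e : Int) : Int := ((PySem.List.pyRange s e 1).map (pvRun c s)).sum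

-- A's inner loop for one comparison sequence, and A's count as a double sum
def pvG (c : Int → Bool) (e i : Int) : Int :=
  ((PySem.List.pyRange (i + 2) (e + 1) 1).map (fun j => if pvAll c i (j - 1) then (1 : Int) else 0)).sum
def pvCnt (c : Int → Bool) (s e : Int) : Int := ((PySem.List.pyRange s (e + 1) 1).map (pvG c e)).sum

lemma pvRun_of_lt (c : Int → Bool) {s k : Int} (h : k < s) : pvRun c s k = 0 := by
  rw [pvRun]; simp [h]

lemma pvRun_of_ge (c : Int → Bool) {s k : Int} (h : s ≤ k) :
    pvRun c s k = if c k then pvRun c s (k - 1) + 1 else 0 := by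
  rw [pvRun]; simp [show ¬ k < s by omega]

lemma foldl_pair_add (l : List Int) (u v : Int → Int) (p : Int × Int) :
    l.foldl (fun acc j => (acc.1 + u j, acc.2 + v j)) p = (p.1 + (l.map u).sum, p.2 + (l.map v).sum) := by
  obtain ⟨a, b⟩ := p
  rw [PySem.List.foldl_prod_mk (f := fun x j => x + u j) (g := fun x j => x + v j),
    PySem.List.foldl_add, PySem.List.foldl_add]

lemma all_incr_eq (arr : List Int) (i b : Int) :
    ((PySem.List.pyRange i b 1).map
      (fun k => decide (PySem.List.pyGetD arr k 0 ≥ PySem.List.pyGetD arr (k + 1) 0))).all (fun x => x)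
    = pvAll (pvCI arr) i b := by
  unfold pvAll pvCI
  rw [List.all_map]
  congr 1

lemma all_decr_eq (arr : List Int) (i j : Int) :
    ((PySem.List.pyRange (i + 1) j 1).map
      (fun k => decide (PySem.List.pyGetD arr k 0 ≥ PySem.List.pyGetD arr (k - 1) 0))).all (fun x => x)
    = pvAll (pvCD arr) i (j - 1) := by
  simp only [pvAll, List.all_map, PySem.List.pyRange_one]
  rw [show (j - (i + 1)).toNat = (j - 1 - i).toNat by omega]
  congr 1
  funext k
  simp only [Function.comp_apply]
  rw [show i + 1 + (k : Int) - 1 = i + (k : Int) by ring, show i + 1 + (k : Int) = i + (k : Int) + 1 by ring]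
  simp [pvCD, ge_iff_le]

lemma ite_cI (arr : List Int) (k x y : Int) :
    (if PySem.List.pyGetD arr k 0 ≥ PySem.List.pyGetD arr (k + 1) 0 then x else y)
    = (if pvCI arr k then x else y) := by
  by_cases h : PySem.List.pyGetD arr k 0 ≥ PySem.List.pyGetD arr (k + 1) 0 <;> simp [pvCI, h]

lemma ite_cD (arr : List Int) (k x y : Int) :
    (if PySem.List.pyGetD arr k 0 ≤ PySem.List.pyGetD arr (k + 1) 0 then x else y)
    = (if pvCD arr k then x else y) := by
  by_cases h : PySem.List.pyGetD arr k 0 ≤ PySem.List.pyGetD arr (k + 1) 0 <;> simp [pvCD, h]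

lemma A_eq (arr : List Int) (s e : Int) :
    count_non_incr_and_non_decr_subranges arr s e = (pvCnt (pvCI arr) s e, pvCnt (pvCD arr) s e) := by
  unfold count_non_incr_and_non_decr_subranges
  simp only [all_incr_eq, all_decr_eq, foldl_pair_add]
  simp only [zero_add, pvCnt, Prod.mk.injEq]
  exact ⟨rfl, rfl⟩

lemma pvS_succ (c : Int → Bool) {s e : Int} (h : s ≤ e) : pvS c s (e + 1) = pvS c s e + pvRun c s e := by
  unfold pvS
  rw [PySem.List.pyRange_one_succ_right h, List.map_append, List.sum_append]
  simp

lemma pvS_low (c : Int → Bool) {s e : Int} (h : e ≤ s) : pvS c s e = 0 := by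
  unfold pvS
  rw [PySem.List.pyRange_one_eq_nil h]
  simp

lemma foldB (c : Int → Bool) (s : Int) : ∀ (n : Nat) (a : Int),
    (PySem.List.pyRange s (s + n) 1).foldl
      (fun (p : Int × Int) k => (p.1 + (if c k then p.2 + 1 else 0), if c k then p.2 + 1 else 0)) (a, 0)
    = (a + pvS c s (s + n), pvRun c s (s + n - 1)) := by
  intro n
  induction n with
  | zero =>
    intro a
    simp only [Nat.cast_zero, add_zero]
    rw [PySem.List.pyRange_one_eq_nil le_rfl, pvS_low c le_rfl, pvRun_of_lt c (by omega)]
    simp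
  | succ n IH =>
    intro a
    rw [show s + ((n + 1 : Nat) : Int) = (s + (n : Nat)) + 1 by push_cast; ring,
      PySem.List.pyRange_one_succ_right (show s ≤ s + (n : Nat) by omega), List.foldl_append, IH]
    simp only [List.foldl_cons, List.foldl_nil]
    rw [← pvRun_of_ge c (show s ≤ s + (n : Nat) by omega), pvS_succ c (show s ≤ s + (n : Nat) by omega)]
    rw [show s + (n : Nat) + 1 - 1 = s + (n : Nat) by ring]
    rw [add_assoc]

lemma B_eq (arr : List Int) (s e : Int) :
    count_non_incr_and_non_decr_subranges_alt arr s e = (pvS (pvCI arr) s (e - 1), pvS (pvCD arr) s (e - 1)) := by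
  unfold count_non_incr_and_non_decr_subranges_alt
  simp only [ite_cI, ite_cD]
  rw [PySem.List.foldl_prod_mk
    (f := fun (p : Int × Int) k => (p.1 + (if pvCI arr k then p.2 + 1 else 0), if pvCI arr k then p.2 + 1 else 0))
    (g := fun (p : Int × Int) k => (p.1 + (if pvCD arr k then p.2 + 1 else 0), if pvCD arr k then p.2 + 1 else 0))]
  by_cases h : s ≤ e - 1
  · rw [show e - 1 = s + ((e - 1 - s).toNat : Int) by omega, foldB, foldB]
    simp
  · rw [PySem.List.pyRange_one_eq_nil (by omega)]
    simp only [List.foldl_nil]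
    rw [pvS_low (pvCI arr) (by omega), pvS_low (pvCD arr) (by omega)]

lemma pvRun_count (c : Int → Bool) (s : Int) : ∀ (n : Nat) (k : Int), k + 1 - s ≤ n →
    pvRun c s k = ((PySem.List.pyRange s (k + 1) 1).map (fun i => if pvAll c i (k + 1) then (1 : Int) else 0)).sum := by
  intro n
  induction n with
  | zero =>
    intro k hk
    rw [pvRun_of_lt c (by omega), PySem.List.pyRange_one_eq_nil (by omega)]
    simp
  | succ n IH =>
    intro k hk
    by_cases hks : k < s
    · rw [pvRun_of_lt c hks, PySem.List.pyRange_one_eq_nil (by omega)]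
      simp
    · have hsk : s ≤ k := by omega
      rw [pvRun_of_ge c hsk]
      by_cases hc : c k = true
      · rw [if_pos hc, IH (k - 1) (by omega), show k - 1 + 1 = k by ring,
          PySem.List.pyRange_one_succ_right hsk, List.map_append, List.sum_append]
        have hall : pvAll c k (k + 1) = c k := by
          rw [pvAll, PySem.List.pyRange_one_singleton]; simp
        have hsplit : ∀ i ∈ PySem.List.pyRange s k 1,
            (if pvAll c i (k + 1) then (1 : Int) else 0) = (if pvAll c i k then (1 : Int) else 0) := by
          intro i hi
          rw [PySem.List.mem_pyRange_one] at hi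
          rw [pvAll, PySem.List.pyRange_one_succ_right (show i ≤ k by omega), List.all_append]
          simp [pvAll, hc]
        rw [List.map_congr_left hsplit]
        simp [hall, hc]
      · rw [if_neg hc]
        symm
        apply List.sum_eq_zero
        intro x hx
        simp only [List.mem_map] at hx
        obtain ⟨i, hi, rfl⟩ := hx
        rw [PySem.List.mem_pyRange_one] at hi
        have hfalse : pvAll c i (k + 1) = false := by
          rw [pvAll]
          simp only [List.all_eq_false]
          exact ⟨k, by rw [PySem.List.mem_pyRange_one]; omega, by simpa using hc⟩
        simp [hfalse]

lemma pvCnt_low (c : Int → Bool) {s e : Int} (h : e ≤ s + 1) : pvCnt c s e = 0 := by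
  unfold pvCnt
  apply List.sum_eq_zero
  intro x hx
  simp only [List.mem_map] at hx
  obtain ⟨i, hi, rfl⟩ := hx
  rw [PySem.List.mem_pyRange_one] at hi
  rw [pvG, PySem.List.pyRange_one_eq_nil (by omega)]
  simp

lemma pvCnt_succ (c : Int → Bool) {s e : Int} (h : s + 1 ≤ e) :
    pvCnt c s (e + 1) = pvCnt c s e + pvRun c s (e - 1) := by
  unfold pvCnt
  rw [PySem.List.pyRange_one_succ_right (show s ≤ e + 1 by omega), List.map_append, List.sum_append,
    PySem.List.pyRange_one_append s e (e + 1) (by omega) (by omega), List.map_append, List.sum_append,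
    PySem.List.pyRange_one_singleton]
  have hlast : pvG c (e + 1) (e + 1) = 0 := by
    rw [pvG, PySem.List.pyRange_one_eq_nil (by omega)]; simp
  have hGe1 : pvG c (e + 1) e = 0 := by
    rw [pvG, PySem.List.pyRange_one_eq_nil (by omega)]; simp
  have hGe : pvG c e e = 0 := by
    rw [pvG, PySem.List.pyRange_one_eq_nil (by omega)]; simp
  have hstep : ∀ i ∈ PySem.List.pyRange s e 1,
      pvG c (e + 1) i = pvG c e i + (if pvAll c i e then (1 : Int) else 0) := by
    intro i hi
    rw [PySem.List.mem_pyRange_one] at hi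
    rw [pvG, pvG, PySem.List.pyRange_one_succ_right (show i + 2 ≤ e + 1 by omega),
      List.map_append, List.sum_append]
    simp [show e + 1 - 1 = e by ring]
  rw [List.map_congr_left hstep, PySem.List.sum_map_add_int,
    pvRun_count c s (e - s).toNat (e - 1) (by omega), show e - 1 + 1 = e by ring]
  simp [hlast, hGe1, hGe]

lemma pvCnt_aux (c : Int → Bool) (s : Int) : ∀ n : Nat, pvCnt c s (s + 1 + n) = pvS c s (s + n) := by
  intro n
  induction n with
  | zero =>
    rw [show s + 1 + ((0 : Nat) : Int) = s + 1 by push_cast; ring,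
      show s + ((0 : Nat) : Int) = s by push_cast; ring,
      pvCnt_low c (by omega), pvS_low c (by omega)]
  | succ n IH =>
    rw [show s + 1 + ((n + 1 : Nat) : Int) = (s + 1 + (n : Nat)) + 1 by push_cast; ring,
      pvCnt_succ c (by omega), IH, show s + 1 + ((n : Nat) : Int) - 1 = s + (n : Nat) by ring,
      show s + ((n + 1 : Nat) : Int) = (s + (n : Nat)) + 1 by push_cast; ring,
      pvS_succ c (by omega)]

lemma pvCnt_eq_pvS (c : Int → Bool) (s e : Int) : pvCnt c s e = pvS c s (e - 1) := by
  by_cases h : e ≤ s + 1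
  · rw [pvCnt_low c h, pvS_low c (by omega)]
  · have h2 := pvCnt_aux c s (e - s - 1).toNat
    rw [show s + 1 + ((e - s - 1).toNat : Int) = e by omega,
      show s + ((e - s - 1).toNat : Int) = e - 1 by omega] at h2
    exact h2

-- ===== VERDICT (by name: the statement is the Claim_ definition above) =====
theorem count_non_incr_and_non_decr_subranges_spec : Claim_equal_count_non_incr_and_non_decr_subranges := by
  intro arr s e _ _
  unfold Spec_count_non_incr_and_non_decr_subranges
  rw [A_eq, B_eq, Prod.mk.injEq]
  exact ⟨pvCnt_eq_pvS _ _ _, pvCnt_eq_pvS _ _ _⟩
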